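-- pv_equiv track=rewrite | github.com/c04nh/coding-test | 프로그래머스/0/120812. 최빈값 구하기/최빈값 구하기.py | solution
-- ===== SOURCE A (Python) =====
-- def solution(array):
--     answer = 0
--     cnt = {}
--
--     for i in array:
--         if i in cnt:
--             cnt[i] += 1
--         else:
--             cnt[i] = 1
--
--     max_value = max(cnt.values())
--     max_key = [k for k, v in cnt.items() if v == max_value]
--
--     if len(max_key) == 1:
--         answer = max_key[0]
--     else:
--         answer = -1
--
--     return answer
-- ===== SOURCE B (Python) =====
-- def solution(array):
--     # sort-then-scan: runs of equal values in the sorted array; track best run incrementally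
--     best, best_cnt, prev, run = -1, 0, None, 0
--     for x in sorted(array):
--         run = run + 1 if x == prev else 1
--         prev = x
--         if run > best_cnt:
--             best, best_cnt = x, run
--         elif run == best_cnt:
--             best = -1
--     return best
-- ===== Notes on version B (the rewrite author's own statement) =====
-- stated objective: alternative
-- what changed: A counts occurrences in a dict in one pass, takes max of the values and collects all argmax keys; B sorts the array and scans runs of equal values once, tracking the best run length and a tie flag incrementally.
import Mathlib
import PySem

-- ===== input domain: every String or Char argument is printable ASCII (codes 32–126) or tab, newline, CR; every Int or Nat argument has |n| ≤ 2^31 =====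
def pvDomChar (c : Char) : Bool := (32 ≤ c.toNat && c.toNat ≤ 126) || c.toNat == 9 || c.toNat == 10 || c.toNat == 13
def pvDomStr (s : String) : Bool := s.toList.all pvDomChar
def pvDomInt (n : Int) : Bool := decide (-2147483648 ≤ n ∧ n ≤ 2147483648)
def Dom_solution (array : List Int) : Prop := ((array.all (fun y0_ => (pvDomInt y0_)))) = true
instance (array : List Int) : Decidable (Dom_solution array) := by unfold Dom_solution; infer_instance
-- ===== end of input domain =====

-- B replaces A's one-pass dict-counting by sort-then-scan over runs of equal values (alternative decomposition, same result).

-- ===== PORT A =====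
def solution (array : List Int) : Int :=
  let cnt := array.foldl
    (fun d i => if d.contains i then d.insert i (d.getD i 0 + 1) else d.insert i 1)
    (PySem.Dict.empty : PySem.Dict Int Int)
  match PySem.List.max? cnt.values (fun v => v) with
  | none => 0   -- Python raises ValueError here (empty array); excluded by Pre_solution
  | some maxValue =>
    let maxKey := (cnt.items.filter (fun kv => kv.2 == maxValue)).map (fun kv => kv.1)
    if maxKey.length = 1 then maxKey.headD 0 else -1

-- ===== PORT B =====
-- one iteration of B's loop; state = (best, best_cnt, prev, run)
def bStep (st : Int × Int × Option Int × Int) (x : Int) : Int × Int × Option Int × Int :=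
  let run' := if st.2.2.1 = some x then st.2.2.2 + 1 else 1
  if st.2.1 < run' then (x, run', some x, run')
  else if run' = st.2.1 then (-1, st.2.1, some x, run')
  else (st.1, st.2.1, some x, run')

def solution_alt (array : List Int) : Int :=
  ((PySem.List.sorted array (fun x => x) false).foldl bStep (-1, 0, none, 0)).1

-- ===== PRECONDITION & SPEC =====
-- Pre_ excludes only the empty array, on which A raises ValueError (max() of an empty sequence).
def Pre_solution (array : List Int) : Prop := array ≠ []
instance (array : List Int) : Decidable (Pre_solution array) := by unfold Pre_solution; infer_instance
def pvWitness_solution : List Int := [1, 2, 2]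

def Spec_solution (array : List Int) (out : Int) : Prop := out = solution_alt array
instance (array : List Int) (out : Int) : Decidable (Spec_solution array out) := by unfold Spec_solution; infer_instance

-- ===== CLAIM (what is proved, stated in full; the proofs are below) =====
def Claim_equal_solution : Prop := ∀ (array : List Int), Dom_solution array → Pre_solution array → Spec_solution array (solution array)

-- ===== LEMMAS AND PROOFS =====

-- the common shape of both results: the single element of the argmax list, else -1
def matchOne (L : List Int) : Int := match L with | [k] => k | _ => -1

-- the distinct values of p whose multiplicity is bc
def keysAt (p : List Int) (bc : Int) : List Int :=
  (PySem.Set.ofList p).filter (fun k => (p.count k : Int) == bc)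

-- invariant of B's scan, over the processed (sorted) prefix p
def LoopInv (p : List Int) (st : Int × Int × Option Int × Int) : Prop :=
  st.2.2.1 = p.getLast? ∧
  st.2.2.2 = (match p.getLast? with | some l => ((p.count l : Int)) | none => 0) ∧
  (∀ k ∈ p, (p.count k : Int) ≤ st.2.1) ∧
  ((p = [] ∧ st.2.1 = 0) ∨ ∃ k ∈ p, (p.count k : Int) = st.2.1) ∧
  st.1 = matchOne (keysAt p st.2.1)

lemma matchOne_of_two {L : List Int} {a b : Int} (ha : a ∈ L) (hb : b ∈ L) (hab : a ≠ b) :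
    matchOne L = -1 := by
  match L, ha, hb with
  | [k], ha, hb => simp_all
  | [], ha, _ => simp at ha
  | (c :: d :: t), _, _ => rfl

lemma matchOne_perm {L L' : List Int} (h : L.Perm L') : matchOne L = matchOne L' := by
  have hl := h.length_eq
  match L, L' with
  | [], [] => rfl
  | [a], [b] => simp [List.perm_singleton] at h; simp [h, matchOne]
  | (a :: c :: t), (b :: d :: u) => rfl
  | [], (_ :: _) => simp at hl
  | (_ :: _), [] => simp at hl
  | [a], (b :: d :: u) => simp at hl
  | (a :: c :: t), [b] => simp at hl

lemma filter_eq_singleton {L : List Int} {q : Int → Bool} {a : Int} (hn : L.Nodup) (ha : a ∈ L)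
    (hq : ∀ b ∈ L, q b = true ↔ b = a) : L.filter q = [a] := by
  induction L with
  | nil => simp at ha
  | cons x t ih =>
    rcases List.mem_cons.1 ha with rfl | hat
    · have hqx : q a = true := (hq a (by simp)).2 rfl
      have hft : t.filter q = [] := by
        apply List.filter_eq_nil_iff.2
        intro b hb hqb
        have hba := (hq b (by simp [hb])).1 hqb
        exact absurd (hba ▸ hb) (List.nodup_cons.1 hn).1
      simp [hqx, hft]
    · have hqx : q x = false := by
        by_contra hcon
        have := (hq x (by simp)).1 (by simpa using hcon)
        exact (List.nodup_cons.1 hn).1 (this ▸ hat)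
      rw [List.filter_cons_of_neg (by simp [hqx])]
      exact ih (List.nodup_cons.1 hn).2 hat (fun b hb => hq b (by simp [hb]))

lemma if_len_eq_matchOne (L : List Int) :
    (if L.length = 1 then L.headD 0 else (-1 : Int)) = matchOne L := by
  match L with
  | [] => rfl
  | [a] => rfl
  | (a :: b :: t) => simp [matchOne]

-- in a ≤-sorted list, an element that is also an upper bound is the last element
lemma le_last_of_sorted {p : List Int} (hps : p.Pairwise (· ≤ ·)) {x : Int} (h : x ∈ p)
    (hub : ∀ y ∈ p, y ≤ x) : p.getLast? = some x := by
  rcases List.eq_nil_or_concat p with rfl | ⟨q, l, rfl⟩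
  · simp at h
  · simp only [List.concat_eq_append] at hps h hub ⊢
    rw [List.getLast?_concat]
    have hql : ∀ y ∈ q, y ≤ l := by
      have := List.pairwise_append.1 hps
      intro y hy; exact this.2.2 y hy l (by simp)
    rcases List.mem_append.1 h with hxq | hxl
    · rw [le_antisymm (hql x hxq) (hub l (by simp))]
    · simp at hxl; rw [hxl]

lemma step_inv (p : List Int) (x : Int) (st : Int × Int × Option Int × Int)
    (hp : ∀ y ∈ p, y ≤ x) (hps : p.Pairwise (· ≤ ·)) (h : LoopInv p st) :
    LoopInv (p ++ [x]) (bStep st x) := by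
  obtain ⟨h1, h2, h3, h4, h5⟩ := h
  have hcx : (p ++ [x]).count x = p.count x + 1 := by simp
  have hck : ∀ k, k ≠ x → (p ++ [x]).count k = p.count k := by
    intro k hk; simp [List.count_append, Ne.symm hk]
  have hrun : (if st.2.2.1 = some x then st.2.2.2 + 1 else 1) = (p.count x : Int) + 1 := by
    by_cases hl : st.2.2.1 = some x
    · rw [if_pos hl]; rw [h1] at hl; rw [h2, hl]
    · rw [if_neg hl]
      have hxp : x ∉ p := fun hmem => hl (h1.trans (le_last_of_sorted hps hmem hp))
      simp [List.count_eq_zero_of_not_mem hxp]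
  have hlast : some x = (p ++ [x]).getLast? := List.getLast?_concat.symm
  have hrun' : ((p.count x : Int) + 1) =
      (match (p ++ [x]).getLast? with | some l => (((p ++ [x]).count l : Int)) | none => 0) := by
    rw [List.getLast?_concat]
    show ((p.count x : Int) + 1) = (((p ++ [x]).count x : Int))
    rw [hcx]; push_cast; ring
  have hofL : PySem.Set.ofList (p ++ [x]) = PySem.Set.add (PySem.Set.ofList p) x :=
    PySem.Set.ofList_append_singleton ..
  unfold bStep
  rw [hrun]
  by_cases hgt : st.2.1 < (p.count x : Int) + 1
  · rw [if_pos hgt]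
    refine ⟨hlast, hrun', ?_, ?_, ?_⟩
    · intro k hk
      by_cases hkx : k = x
      · subst hkx; rw [hcx]; push_cast; omega
      · rw [hck k hkx]
        exact le_of_lt (lt_of_le_of_lt (h3 k ((List.mem_append.1 hk).resolve_right (by simp [hkx]))) hgt)
    · exact Or.inr ⟨x, by simp, by rw [hcx]; push_cast; omega⟩
    · have hsing : keysAt (p ++ [x]) ((p.count x : Int) + 1) = [x] := by
        unfold keysAt
        apply filter_eq_singleton
        · rw [hofL]; exact PySem.Set.nodup_add _ _ (PySem.Set.nodup_ofList _)
        · rw [hofL]; exact (PySem.Set.mem_add ..).2 (Or.inr rfl)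
        · intro b hb
          rw [hofL] at hb
          constructor
          · intro hqb
            by_contra hbx
            have hbp : b ∈ p := by
              rcases (PySem.Set.mem_add ..).1 hb with hbs | hbeq
              · exact (PySem.Set.mem_ofList ..).1 hbs
              · exact absurd hbeq hbx
            have hle := h3 b hbp
            rw [hck b hbx] at hqb
            simp only [beq_iff_eq] at hqb
            omega
          · intro hbx; subst hbx
            rw [hcx]; simp only [beq_iff_eq]; push_cast; omega
      rw [hsing]; rfl
  · rw [if_neg hgt]
    by_cases heq : (p.count x : Int) + 1 = st.2.1
    · rw [if_pos heq]
      obtain ⟨k0, hk0p, hk0c⟩ : ∃ k ∈ p, (p.count k : Int) = st.2.1 := by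
        rcases h4 with ⟨hpnil, hbc⟩ | hw
        · exfalso; subst hpnil; simp at heq; omega
        · exact hw
      have hk0x : k0 ≠ x := by intro hkx; subst hkx; omega
      refine ⟨hlast, heq ▸ hrun', ?_, ?_, ?_⟩
      · intro k hk
        by_cases hkx : k = x
        · subst hkx; rw [hcx]; push_cast; omega
        · rw [hck k hkx]
          exact h3 k ((List.mem_append.1 hk).resolve_right (by simp [hkx]))
      · exact Or.inr ⟨x, by simp, by rw [hcx]; push_cast; omega⟩
      · symm
        apply matchOne_of_two (a := k0) (b := x) _ _ hk0x
        · unfold keysAt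
          refine List.mem_filter.2 ⟨?_, ?_⟩
          · rw [hofL]; exact (PySem.Set.mem_add ..).2 (Or.inl ((PySem.Set.mem_ofList ..).2 hk0p))
          · rw [hck k0 hk0x]; simp [hk0c]
        · unfold keysAt
          refine List.mem_filter.2 ⟨?_, ?_⟩
          · rw [hofL]; exact (PySem.Set.mem_add ..).2 (Or.inr rfl)
          · rw [hcx]; simp only [beq_iff_eq]; push_cast; omega
    · rw [if_neg heq]
      refine ⟨hlast, hrun', ?_, ?_, ?_⟩
      · intro k hk
        by_cases hkx : k = x
        · subst hkx; rw [hcx]; push_cast; omega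
        · rw [hck k hkx]
          exact h3 k ((List.mem_append.1 hk).resolve_right (by simp [hkx]))
      · obtain ⟨k0, hk0p, hk0c⟩ : ∃ k ∈ p, (p.count k : Int) = st.2.1 := by
          rcases h4 with ⟨hpnil, hbc⟩ | hw
          · exfalso; subst hpnil; simp at hgt heq; omega
          · exact hw
        have hk0x : k0 ≠ x := by intro hkx; subst hkx; omega
        refine Or.inr ⟨k0, by simp [hk0p], ?_⟩
        rw [hck k0 hk0x]; exact hk0c
      · rw [h5]
        congr 1
        unfold keysAt
        rw [hofL]
        by_cases hxp : x ∈ p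
        · rw [PySem.Set.add_of_mem ((PySem.Set.mem_ofList ..).2 hxp)]
          apply List.filter_congr
          intro k hk
          by_cases hkx : k = x
          · rw [hkx]
            have e1 : (((p ++ [x]).count x : Int) == st.2.1) = false :=
              beq_eq_false_iff_ne.mpr (by rw [hcx]; push_cast; omega)
            have e2 : ((p.count x : Int) == st.2.1) = false :=
              beq_eq_false_iff_ne.mpr (by omega)
            rw [e1, e2]
          · rw [hck k hkx]
        · rw [PySem.Set.add_of_not_mem (fun hc => hxp ((PySem.Set.mem_ofList ..).1 hc))]
          rw [List.filter_append]
          have e1 : (((p ++ [x]).count x : Int) == st.2.1) = false :=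
            beq_eq_false_iff_ne.mpr (by rw [hcx]; push_cast; omega)
          rw [show List.filter (fun k => (((p ++ [x]).count k : Int) == st.2.1)) [x] = [] by
            simp only [List.filter_cons, List.filter_nil, e1]; simp]
          rw [List.append_nil]
          symm
          apply List.filter_congr
          intro k hk
          have hkx : k ≠ x := fun hc => hxp (hc ▸ (PySem.Set.mem_ofList ..).1 hk)
          rw [hck k hkx]

lemma loop_inv : ∀ (s p : List Int) (st : Int × Int × Option Int × Int),
    (p ++ s).Pairwise (· ≤ ·) → LoopInv p st → LoopInv (p ++ s) (s.foldl bStep st) := by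
  intro s
  induction s with
  | nil => intro p st _ h; simpa using h
  | cons x t ih =>
    intro p st hpw h
    have hpa := List.pairwise_append.1 hpw
    have hstep : LoopInv (p ++ [x]) (bStep st x) := by
      apply step_inv p x st
      · intro y hy; exact hpa.2.2 y hy x (by simp)
      · exact hpa.1
      · exact h
    have hassoc : p ++ x :: t = (p ++ [x]) ++ t := by simp
    rw [hassoc, List.foldl_cons]
    exact ih (p ++ [x]) (bStep st x) (by rw [← hassoc]; exact hpw) hstep

-- A's counting loop builds exactly collections.Counter(array)
lemma cnt_eq_counter (array : List Int) :
    array.foldl (fun d i => if d.contains i then d.insert i (d.getD i 0 + 1) else d.insert i 1)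
      (PySem.Dict.empty : PySem.Dict Int Int) = PySem.Dict.counter array := by
  rw [← PySem.Dict.foldl_insert_getD_add_one_eq_counter]
  congr 1
  funext d i
  by_cases h : d.contains i
  · simp [h]
  · have h0 := PySem.Dict.getD_of_not_contains (d := d) (k := i) (d0 := (0:Int)) (by simpa using h)
    simp [h, h0]

lemma main_eq (array : List Int) (hpre : array ≠ []) : solution array = solution_alt array := by
  -- B side: run the invariant over the sorted list
  have hsp : (PySem.List.sorted array (fun x => x) false).Perm array :=
    PySem.List.sorted_perm ..
  have hcnt : ∀ k : Int, (PySem.List.sorted array (fun x => x) false).count k = array.count k :=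
    fun k => hsp.count_eq k
  have h0 : LoopInv [] (-1, 0, none, 0) := ⟨rfl, rfl, by simp, Or.inl ⟨rfl, rfl⟩, rfl⟩
  have hBinv : LoopInv (PySem.List.sorted array (fun x => x) false)
      ((PySem.List.sorted array (fun x => x) false).foldl bStep (-1, 0, none, 0)) := by
    have := loop_inv (PySem.List.sorted array (fun x => x) false) [] (-1, 0, none, 0)
      (by simpa using PySem.List.sorted_pairwise array (fun x => x)) h0
    simpa using this
  obtain ⟨-, -, hB3, hB4, hB5⟩ := hBinv
  -- A side: name the max of the counts
  obtain ⟨a0, ha0⟩ := List.exists_mem_of_ne_nil array hpre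
  have hvne : ((PySem.Set.ofList array).map (fun k => (array.count k : Int))) ≠ [] := by
    intro hnil
    rw [List.map_eq_nil_iff] at hnil
    exact (List.ne_nil_of_mem ((PySem.Set.mem_ofList ..).2 ha0)) hnil
  obtain ⟨M, hM⟩ : ∃ M, PySem.List.max?
      ((PySem.Set.ofList array).map fun k => (array.count k : Int)) (fun v => v) = some M := by
    rcases hOpt : PySem.List.max? ((PySem.Set.ofList array).map fun k => (array.count k : Int)) (fun v => v) with _ | M
    · exact absurd ((PySem.List.max?_eq_none_iff _ _).1 hOpt) hvne
    · exact ⟨M, rfl⟩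
  obtain ⟨kM, hkM, hkMv⟩ := List.mem_map.1 (PySem.List.max?_mem hM)
  have hMub := PySem.List.max?_isMax hM
  have hA : solution array = matchOne ((PySem.Set.ofList array).filter
      (fun k => ((array.count k : Int) == M))) := by
    simp only [solution, cnt_eq_counter, PySem.Dict.values, PySem.Dict.items_counter,
      List.map_map]
    simp only [Function.comp_def]
    rw [hM]
    simp only [List.filter_map, List.map_map, Function.comp_def, List.map_id']
    rw [if_len_eq_matchOne]
  rw [hA, solution_alt, hB5]
  have hMbc : M = (List.foldl bStep (-1, 0, none, 0)
      (PySem.List.sorted array (fun x => x) false)).2.1 := by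
    apply le_antisymm
    · have hkMs : kM ∈ PySem.List.sorted array (fun x => x) false :=
        hsp.mem_iff.2 ((PySem.Set.mem_ofList ..).1 hkM)
      have := hB3 kM hkMs
      rw [hcnt kM, hkMv] at this
      exact this
    · rcases hB4 with ⟨hsnil, hbc0⟩ | ⟨k0, hk0s, hk0c⟩
      · exact absurd ((hsnil ▸ hsp : List.Perm [] array).symm.eq_nil) hpre
      · have hk0a : k0 ∈ array := hsp.mem_iff.1 hk0s
        have hle := hMub ((array.count k0 : Int))
          (List.mem_map.2 ⟨k0, (PySem.Set.mem_ofList ..).2 hk0a, rfl⟩)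
        rw [← hk0c, hcnt k0]
        exact hle
  have hperm : (PySem.Set.ofList (PySem.List.sorted array (fun x => x) false)).Perm
      (PySem.Set.ofList array) := by
    rw [List.perm_ext_iff_of_nodup (PySem.Set.nodup_ofList _) (PySem.Set.nodup_ofList _)]
    intro a
    rw [PySem.Set.mem_ofList, PySem.Set.mem_ofList]
    exact hsp.mem_iff
  have hfe : keysAt (PySem.List.sorted array (fun x => x) false)
      (List.foldl bStep (-1, 0, none, 0) (PySem.List.sorted array (fun x => x) false)).2.1 =
      (PySem.Set.ofList (PySem.List.sorted array (fun x => x) false)).filter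
        (fun k => ((array.count k : Int) == M)) := by
    unfold keysAt
    apply List.filter_congr
    intro k _
    rw [hcnt k, ← hMbc]
  rw [hfe]
  exact (matchOne_perm (hperm.filter _)).symm

-- ===== VERDICT (by name: the statement is the Claim_ definition above) =====
theorem solution_spec : Claim_equal_solution := by
  intro array _ hpre
  exact main_eq array hpre
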